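-- pv_equiv track=rewrite | github.com/anabellaj/TrimestreV | Numeros/ListaNumeros.py | oblongos
-- ===== SOURCE A (Python) =====
-- def oblongos(number):
--     number = int(number)
--     suma = False
--     x, y = 1, 0
--     for n in range(1, number+1):
--         if n*(n + 1) == number:
--             suma = True
--     if suma == True:
--         return x
--     else:
--         return y
-- ===== SOURCE B (Python) =====
-- def oblongos(number):
--     number = int(number)
--     if number < 2:
--         return 0
--     lo, hi = 1, number
--     while lo <= hi:
--         mid = (lo + hi) // 2
--         p = mid * (mid + 1)
--         if p == number:
--             return 1
--         if p < number:
--             lo = mid + 1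
--         else:
--             hi = mid - 1
--     return 0
-- ===== Notes on version B (the rewrite author's own statement) =====
-- stated objective: faster
-- what changed: Replaces A's full scan of every n in range(1, number+1) by a binary search over [1, number] for n with n*(n+1) == number, using the strict monotonicity of n*(n+1) on positives.
import Mathlib
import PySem

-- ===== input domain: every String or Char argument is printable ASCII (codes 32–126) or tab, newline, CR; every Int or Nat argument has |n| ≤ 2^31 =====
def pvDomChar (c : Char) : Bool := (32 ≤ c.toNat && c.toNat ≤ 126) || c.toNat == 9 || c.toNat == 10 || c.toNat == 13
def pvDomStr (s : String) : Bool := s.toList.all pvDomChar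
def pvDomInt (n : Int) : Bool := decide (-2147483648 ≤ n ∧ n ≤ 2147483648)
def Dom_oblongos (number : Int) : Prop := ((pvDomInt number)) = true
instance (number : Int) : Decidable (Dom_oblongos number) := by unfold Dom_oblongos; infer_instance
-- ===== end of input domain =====

-- B replaces A's linear scan of 1..number by a binary search for n with n*(n+1) == number (faster).

-- ===== PORT A =====
def oblongos (number : Int) : Int :=
  -- number = int(number) is a no-op on an int argument
  let suma : Bool :=
    (PySem.List.pyRange 1 (number + 1) 1).foldl
      (fun suma n => if n * (n + 1) = number then true else suma) false
  if suma = true then 1 else 0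

-- ===== PORT B =====
def obLoop (number lo hi : Int) : Int :=
  if h : lo ≤ hi then
    let mid := PySem.Int.floordiv (lo + hi) 2
    let p := mid * (mid + 1)
    if p = number then 1
    else if p < number then obLoop number (mid + 1) hi
    else obLoop number lo (mid - 1)
  else 0
termination_by (hi + 1 - lo).toNat
decreasing_by
  · have := PySem.Int.floordiv_two_mid_bounds h; omega
  · have := PySem.Int.floordiv_two_mid_bounds h; omega

def oblongos_alt (number : Int) : Int :=
  if number < 2 then 0 else obLoop number 1 number

-- ===== PRECONDITION & SPEC =====
def Spec_oblongos (number : Int) (out : Int) : Prop := out = oblongos_alt number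
instance (number : Int) (out : Int) : Decidable (Spec_oblongos number out) := by unfold Spec_oblongos; infer_instance

-- ===== CLAIM (what is proved, stated in full; the proofs are below) =====
def Claim_equal_oblongos : Prop := ∀ (number : Int), Dom_oblongos number → Spec_oblongos number (oblongos number)

-- ===== LEMMAS AND PROOFS =====

theorem oblong_mono {n m : Int} (h1 : 1 ≤ n) (h2 : n ≤ m) : n * (n + 1) ≤ m * (m + 1) := by
  nlinarith

theorem foldl_or_ite (number : Int) (l : List Int) (s : Bool) :
    l.foldl (fun suma n => if n * (n + 1) = number then true else suma) s
      = (s || l.any (fun n => n * (n + 1) == number)) := by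
  induction l generalizing s with
  | nil => simp
  | cons a t ih =>
    simp only [List.foldl_cons, List.any_cons, ih]
    by_cases h : a * (a + 1) = number
    · simp [h]
    · have hb : (a * (a + 1) == number) = false := by simp [h]
      simp [hb, decide_eq_false h]

theorem oblongos_eq_one_iff (number : Int) :
    oblongos number = 1 ↔ ∃ n : Int, 1 ≤ n ∧ n ≤ number ∧ n * (n + 1) = number := by
  unfold oblongos
  rw [foldl_or_ite]
  simp only [Bool.false_or]
  by_cases h : (PySem.List.pyRange 1 (number + 1) 1).any (fun n => n * (n + 1) == number) = true
  · rw [if_pos h]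
    rw [List.any_eq_true] at h
    obtain ⟨n, hn, hc⟩ := h
    rw [PySem.List.mem_pyRange_one] at hn
    simp only [beq_iff_eq] at hc
    exact ⟨fun _ => ⟨n, hn.1, by omega, hc⟩, fun _ => rfl⟩
  · rw [if_neg h]
    constructor
    · intro hh; exact absurd hh (by decide)
    · rintro ⟨n, h1, h2, h3⟩
      exfalso; apply h
      rw [List.any_eq_true]
      exact ⟨n, PySem.List.mem_pyRange_one.mpr ⟨h1, by omega⟩, by simp [h3]⟩

theorem obLoop_zero_or_one (number lo hi : Int) : obLoop number lo hi = 0 ∨ obLoop number lo hi = 1 := by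
  fun_induction obLoop number lo hi <;> first | (right; rfl) | (left; rfl) | assumption

theorem obLoop_sound (number lo hi : Int) (h : obLoop number lo hi = 1) :
    ∃ n : Int, lo ≤ n ∧ n ≤ hi ∧ n * (n + 1) = number := by
  fun_induction obLoop number lo hi with
  | case1 lo hi hle mid p hp =>
    have := PySem.Int.floordiv_two_mid_bounds hle
    exact ⟨mid, this.1, this.2, hp⟩
  | case2 lo hi hle mid p hp hlt ih =>
    obtain ⟨n, h1, h2, h3⟩ := ih h
    have := PySem.Int.floordiv_two_mid_bounds hle
    exact ⟨n, by omega, h2, h3⟩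
  | case3 lo hi hle mid p hp hlt ih =>
    obtain ⟨n, h1, h2, h3⟩ := ih h
    have := PySem.Int.floordiv_two_mid_bounds hle
    exact ⟨n, h1, by omega, h3⟩
  | case4 => simp at h

theorem obLoop_complete (number lo hi n : Int) (hlo : 1 ≤ lo)
    (h1 : lo ≤ n) (h2 : n ≤ hi) (h3 : n * (n + 1) = number) :
    obLoop number lo hi = 1 := by
  fun_induction obLoop number lo hi with
  | case1 => rfl
  | case2 lo hi hle mid p hp hlt ih =>
    have hb := PySem.Int.floordiv_two_mid_bounds hle
    apply ih (by omega) _ h2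
    -- since p = mid*(mid+1) < number = n*(n+1) and both ≥ 1, n > mid
    by_contra hcon
    have : n * (n + 1) ≤ mid * (mid + 1) := oblong_mono (show (1:Int) ≤ n by omega) (by omega)
    omega
  | case3 lo hi hle mid p hp hlt ih =>
    have hb := PySem.Int.floordiv_two_mid_bounds hle
    apply ih hlo h1
    -- since p = mid*(mid+1) > number = n*(n+1), n < mid
    by_contra hcon
    have : mid * (mid + 1) ≤ n * (n + 1) := oblong_mono (show (1:Int) ≤ mid by omega) (by omega)
    omega
  | case4 lo hi hle => omega

-- ===== VERDICT (by name: the statement is the Claim_ definition above) =====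
theorem oblongos_spec : Claim_equal_oblongos := by
  intro number _
  unfold Spec_oblongos oblongos_alt
  by_cases hP : ∃ n : Int, 1 ≤ n ∧ n ≤ number ∧ n * (n + 1) = number
  · rw [(oblongos_eq_one_iff number).mpr hP]
    obtain ⟨n, h1, h2, h3⟩ := hP
    have h2n : 2 ≤ number := by nlinarith
    rw [if_neg (by omega)]
    exact (obLoop_complete number 1 number n le_rfl h1 h2 h3).symm
  · have hA : oblongos number = 0 := by
      unfold oblongos
      rw [foldl_or_ite]
      simp only [Bool.false_or]
      by_cases h : (PySem.List.pyRange 1 (number + 1) 1).any (fun n => n * (n + 1) == number) = true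
      · exfalso
        rw [List.any_eq_true] at h
        obtain ⟨n, hn, hc⟩ := h
        rw [PySem.List.mem_pyRange_one] at hn
        simp only [beq_iff_eq] at hc
        exact hP ⟨n, hn.1, by omega, hc⟩
      · simp [h]
    rw [hA]
    split_ifs with h2
    · rfl
    · rcases obLoop_zero_or_one number 1 number with h | h
      · exact h.symm
      · exact absurd (obLoop_sound number 1 number h) hP
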